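-- pv_equiv track=rewrite | github.com/shahrooz1997/Scheduler | prepare_for_runnig.py | what_is_processes_for
-- ===== SOURCE A (Python) =====
-- GAPBS_address = '/Disk3TB/kasraa/zsim/gapbs'
--
-- graph = "twitter"
--
-- def what_is_processes_for(benchmark):
-- 	processes = ""
-- 	if(benchmark == "1_bwaves"):
-- 		for i in range(16):
-- 			processes += "process" + str(i) + " = { "
-- 			processes += "command = \"./bwaves_base.i386-m32-gcc42-nn\";"
-- 			processes += " };\n"
-- 		return processes
-- 	elif(benchmark == "2_gems"):
-- 		for i in range(16):
-- 			processes += "process" + str(i) + " = { "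
-- 			processes += "command = \"./GemsFDTD_base.i386-m32-gcc42-nn\";"
-- 			processes += " };\n"
-- 		return processes
-- 	elif(benchmark == "4_mcf"):
-- 		for i in range(16):
-- 			processes += "process" + str(i) + " = { "
-- 			processes += "command = \"./mcf_base.i386-m32-gcc42-nn inp.in\";"
-- 			processes += " };\n"
-- 		return processes
-- 	elif(benchmark == "5_milc"):
-- 		for i in range(16):
-- 			processes += "process" + str(i) + " = { "
-- 			processes += "command = \"./milc_base.i386-m32-gcc42-nn\"; input = \"su3imp.in\";"
-- 			processes += " };\n"
-- 		return processes
-- 	elif(benchmark == "7_mix"):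
-- 		for i in range(16):
-- 			if(i % 4 == 0):
-- 				processes += "process" + str(i) + " = { "
-- 				processes += "command = \"./bwaves_base.i386-m32-gcc42-nn\";"
-- 				processes += " };\n"
-- 			if(i % 4 == 1):
-- 				processes += "process" + str(i) + " = { "
-- 				processes += "command = \"./GemsFDTD_base.i386-m32-gcc42-nn\";"
-- 				processes += " };\n"
-- 			if(i % 4 == 2):
-- 				processes += "process" + str(i) + " = { "
-- 				processes += "command = \"./mcf_base.i386-m32-gcc42-nn inp.in\";"
-- 				processes += " };\n"
-- 			if(i % 4 == 3):
-- 				processes += "process" + str(i) + " = { "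
-- 				processes += "command = \"./milc_base.i386-m32-gcc42-nn\"; input = \"su3imp.in\";"
-- 				processes += " };\n"
-- 		return processes
-- 	elif(benchmark == "1_bfs"):
-- 		processes += "process" + str(0) + " = { "
-- 		processes += "command = \"" + GAPBS_address + "/bfs -f " + GAPBS_address + "/benchmark/graphs/" + graph + ".sg -n64\";"
-- 		processes += " };\n"
-- 		return processes;
-- 	elif(benchmark == "2_pr"):
-- 		processes += "process" + str(0) + " = { "
-- 		processes += "command = \"" + GAPBS_address + "/pr -f " + GAPBS_address + "/benchmark/graphs/" + graph + ".sg -i1000 -t1e-4 -n16\";"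
-- 		processes += " };\n"
-- 		return processes;
-- 	elif(benchmark == "3_cc"):
-- 		processes += "process" + str(0) + " = { "
-- 		processes += "command = \"" + GAPBS_address + "/cc -f " + GAPBS_address + "/benchmark/graphs/" + graph + ".sg -n16\";"
-- 		processes += " };\n"
-- 		return processes;
-- 	elif(benchmark == "4_bc"):
-- 		processes += "process" + str(0) + " = { "
-- 		processes += "command = \"" + GAPBS_address + "/bc -f " + GAPBS_address + "/benchmark/graphs/" + graph + ".sg -i4 -n16\";"
-- 		processes += " };\n"
-- 		return processes;
-- 	elif(benchmark == "5_sssp"):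
-- 		processes += "process" + str(0) + " = { "
-- 		processes += "command = \"" + GAPBS_address + "/sssp -f " + GAPBS_address + "/benchmark/graphs/" + graph + ".wsg -n64 -d2\";"
-- 		processes += " };\n"
-- 		return processes;
-- 	elif(benchmark == "6_tc"):
-- 		processes += "process" + str(0) + " = { "
-- 		processes += "command = \"" + GAPBS_address + "/tc -f " + GAPBS_address + "/benchmark/graphs/" + graph + "U.sg -n3\";"
-- 		processes += " };\n"
-- 		return processes;
-- ===== SOURCE B (Python) =====
-- GAPBS_address = '/Disk3TB/kasraa/zsim/gapbs'
--
-- graph = "twitter"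
--
-- _BW = 'command = "./bwaves_base.i386-m32-gcc42-nn";'
-- _GE = 'command = "./GemsFDTD_base.i386-m32-gcc42-nn";'
-- _MC = 'command = "./mcf_base.i386-m32-gcc42-nn inp.in";'
-- _MI = 'command = "./milc_base.i386-m32-gcc42-nn"; input = "su3imp.in";'
--
-- def _gap(tool, tail):
--     return ('command = "' + GAPBS_address + '/' + tool + ' -f '
--             + GAPBS_address + '/benchmark/graphs/' + graph + tail + '";')
--
-- _TABLE = {
--     "1_bwaves": (16, [_BW]),
--     "2_gems":   (16, [_GE]),
--     "4_mcf":    (16, [_MC]),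
--     "5_milc":   (16, [_MI]),
--     "7_mix":    (16, [_BW, _GE, _MC, _MI]),
--     "1_bfs":    (1, [_gap("bfs", ".sg -n64")]),
--     "2_pr":     (1, [_gap("pr", ".sg -i1000 -t1e-4 -n16")]),
--     "3_cc":     (1, [_gap("cc", ".sg -n16")]),
--     "4_bc":     (1, [_gap("bc", ".sg -i4 -n16")]),
--     "5_sssp":   (1, [_gap("sssp", ".wsg -n64 -d2")]),
--     "6_tc":     (1, [_gap("tc", "U.sg -n3")]),
-- }
--
-- def what_is_processes_for(benchmark):
--     spec = _TABLE.get(benchmark)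
--     if spec is None:
--         return None
--     n, cmds = spec
--     return "".join("process" + str(i) + " = { " + cmds[i % len(cmds)] + " };\n"
--                    for i in range(n))
-- ===== Notes on version B (the rewrite author's own statement) =====
-- stated objective: simpler
-- what changed: Replaced A's nine separate branch-with-loop blocks by a single table mapping each benchmark to a process count and a command list, plus one uniform emission loop that joins the per-process lines, selecting the command by index modulo the list length.
import Mathlib
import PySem

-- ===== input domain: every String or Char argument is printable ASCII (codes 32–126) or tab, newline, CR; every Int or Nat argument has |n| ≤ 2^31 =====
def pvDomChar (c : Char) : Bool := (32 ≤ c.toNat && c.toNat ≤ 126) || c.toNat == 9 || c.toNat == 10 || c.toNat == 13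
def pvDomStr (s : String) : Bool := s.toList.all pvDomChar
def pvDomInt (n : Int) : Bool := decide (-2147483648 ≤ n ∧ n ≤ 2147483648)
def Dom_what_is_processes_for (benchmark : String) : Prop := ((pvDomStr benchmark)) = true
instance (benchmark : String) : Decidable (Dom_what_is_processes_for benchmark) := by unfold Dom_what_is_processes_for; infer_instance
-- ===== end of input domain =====

-- B replaces A's nine branch-with-loop blocks by one table lookup plus a single uniform emission loop (objective: simpler).

-- ===== PORT A =====
def pvGAPBS : String := "/Disk3TB/kasraa/zsim/gapbs"
def pvGraph : String := "twitter"

def what_is_processes_for (benchmark : String) : Option String :=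
  let processes := ""
  if benchmark == "1_bwaves" then
    some ((PySem.List.pyRange 0 16 1).foldl (fun processes i =>
      ((processes ++ ("process" ++ PySem.Int.toStr i ++ " = { "))
        ++ "command = \"./bwaves_base.i386-m32-gcc42-nn\";")
        ++ " };\n") processes)
  else if benchmark == "2_gems" then
    some ((PySem.List.pyRange 0 16 1).foldl (fun processes i =>
      ((processes ++ ("process" ++ PySem.Int.toStr i ++ " = { "))
        ++ "command = \"./GemsFDTD_base.i386-m32-gcc42-nn\";")
        ++ " };\n") processes)
  else if benchmark == "4_mcf" then
    some ((PySem.List.pyRange 0 16 1).foldl (fun processes i =>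
      ((processes ++ ("process" ++ PySem.Int.toStr i ++ " = { "))
        ++ "command = \"./mcf_base.i386-m32-gcc42-nn inp.in\";")
        ++ " };\n") processes)
  else if benchmark == "5_milc" then
    some ((PySem.List.pyRange 0 16 1).foldl (fun processes i =>
      ((processes ++ ("process" ++ PySem.Int.toStr i ++ " = { "))
        ++ "command = \"./milc_base.i386-m32-gcc42-nn\"; input = \"su3imp.in\";")
        ++ " };\n") processes)
  else if benchmark == "7_mix" then
    some ((PySem.List.pyRange 0 16 1).foldl (fun processes i =>
      let processes := if PySem.Int.mod i 4 == 0 then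
        ((processes ++ ("process" ++ PySem.Int.toStr i ++ " = { "))
          ++ "command = \"./bwaves_base.i386-m32-gcc42-nn\";") ++ " };\n"
        else processes
      let processes := if PySem.Int.mod i 4 == 1 then
        ((processes ++ ("process" ++ PySem.Int.toStr i ++ " = { "))
          ++ "command = \"./GemsFDTD_base.i386-m32-gcc42-nn\";") ++ " };\n"
        else processes
      let processes := if PySem.Int.mod i 4 == 2 then
        ((processes ++ ("process" ++ PySem.Int.toStr i ++ " = { "))
          ++ "command = \"./mcf_base.i386-m32-gcc42-nn inp.in\";") ++ " };\n"
        else processes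
      let processes := if PySem.Int.mod i 4 == 3 then
        ((processes ++ ("process" ++ PySem.Int.toStr i ++ " = { "))
          ++ "command = \"./milc_base.i386-m32-gcc42-nn\"; input = \"su3imp.in\";") ++ " };\n"
        else processes
      processes) processes)
  else if benchmark == "1_bfs" then
    some (((processes ++ ("process" ++ PySem.Int.toStr 0 ++ " = { "))
      ++ ("command = \"" ++ pvGAPBS ++ "/bfs -f " ++ pvGAPBS ++ "/benchmark/graphs/" ++ pvGraph ++ ".sg -n64\";"))
      ++ " };\n")
  else if benchmark == "2_pr" then
    some (((processes ++ ("process" ++ PySem.Int.toStr 0 ++ " = { "))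
      ++ ("command = \"" ++ pvGAPBS ++ "/pr -f " ++ pvGAPBS ++ "/benchmark/graphs/" ++ pvGraph ++ ".sg -i1000 -t1e-4 -n16\";"))
      ++ " };\n")
  else if benchmark == "3_cc" then
    some (((processes ++ ("process" ++ PySem.Int.toStr 0 ++ " = { "))
      ++ ("command = \"" ++ pvGAPBS ++ "/cc -f " ++ pvGAPBS ++ "/benchmark/graphs/" ++ pvGraph ++ ".sg -n16\";"))
      ++ " };\n")
  else if benchmark == "4_bc" then
    some (((processes ++ ("process" ++ PySem.Int.toStr 0 ++ " = { "))
      ++ ("command = \"" ++ pvGAPBS ++ "/bc -f " ++ pvGAPBS ++ "/benchmark/graphs/" ++ pvGraph ++ ".sg -i4 -n16\";"))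
      ++ " };\n")
  else if benchmark == "5_sssp" then
    some (((processes ++ ("process" ++ PySem.Int.toStr 0 ++ " = { "))
      ++ ("command = \"" ++ pvGAPBS ++ "/sssp -f " ++ pvGAPBS ++ "/benchmark/graphs/" ++ pvGraph ++ ".wsg -n64 -d2\";"))
      ++ " };\n")
  else if benchmark == "6_tc" then
    some (((processes ++ ("process" ++ PySem.Int.toStr 0 ++ " = { "))
      ++ ("command = \"" ++ pvGAPBS ++ "/tc -f " ++ pvGAPBS ++ "/benchmark/graphs/" ++ pvGraph ++ "U.sg -n3\";"))
      ++ " };\n")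
  else
    none

-- ===== PORT B =====
def pvBW : String := "command = \"./bwaves_base.i386-m32-gcc42-nn\";"
def pvGE : String := "command = \"./GemsFDTD_base.i386-m32-gcc42-nn\";"
def pvMC : String := "command = \"./mcf_base.i386-m32-gcc42-nn inp.in\";"
def pvMI : String := "command = \"./milc_base.i386-m32-gcc42-nn\"; input = \"su3imp.in\";"

def pvGap (tool tail : String) : String :=
  "command = \"" ++ pvGAPBS ++ "/" ++ tool ++ " -f "
    ++ pvGAPBS ++ "/benchmark/graphs/" ++ pvGraph ++ tail ++ "\";"

def pvTable : PySem.Dict String (Int × List String) :=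
  PySem.Dict.ofList
  [ ("1_bwaves", ((16 : Int), [pvBW])),
    ("2_gems",   (16, [pvGE])),
    ("4_mcf",    (16, [pvMC])),
    ("5_milc",   (16, [pvMI])),
    ("7_mix",    (16, [pvBW, pvGE, pvMC, pvMI])),
    ("1_bfs",    (1, [pvGap "bfs" ".sg -n64"])),
    ("2_pr",     (1, [pvGap "pr" ".sg -i1000 -t1e-4 -n16"])),
    ("3_cc",     (1, [pvGap "cc" ".sg -n16"])),
    ("4_bc",     (1, [pvGap "bc" ".sg -i4 -n16"])),
    ("5_sssp",   (1, [pvGap "sssp" ".wsg -n64 -d2"])),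
    ("6_tc",     (1, [pvGap "tc" "U.sg -n3"])) ]

def what_is_processes_for_alt (benchmark : String) : Option String :=
  match PySem.Dict.get? pvTable benchmark with
  | none => none
  | some (n, cmds) =>
      some (PySem.Str.join "" ((PySem.List.pyRange 0 n 1).map (fun i =>
        "process" ++ PySem.Int.toStr i ++ " = { "
          ++ (PySem.List.pyGet? cmds (PySem.Int.mod i (cmds.length : Int))).getD ""
          ++ " };\n")))

-- ===== PRECONDITION & SPEC =====
def Spec_what_is_processes_for (benchmark : String) (out : Option String) : Prop := out = what_is_processes_for_alt benchmark
instance (benchmark : String) (out : Option String) : Decidable (Spec_what_is_processes_for benchmark out) := by unfold Spec_what_is_processes_for; infer_instance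

-- ===== CLAIM (what is proved, stated in full; the proofs are below) =====
def Claim_equal_what_is_processes_for : Prop := ∀ (benchmark : String), Dom_what_is_processes_for benchmark → Spec_what_is_processes_for benchmark (what_is_processes_for benchmark)

-- ===== LEMMAS AND PROOFS =====

-- '"".join' over a cons (string-level form of PySem.Chars.join_cons_cons / join_singleton)
theorem pvJoinNil : PySem.Str.join "" ([] : List String) = "" := by
  rw [← String.toList_inj]; simp [PySem.Str.join, PySem.Chars.join_nil]

theorem pvJoinCons (x : String) (l : List String) :
    PySem.Str.join "" (x :: l) = x ++ PySem.Str.join "" l := by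
  rw [← String.toList_inj]
  cases l with
  | nil => simp [PySem.Str.join, PySem.Chars.join_singleton, PySem.Chars.join_nil]
  | cons y ys => simp [PySem.Str.join, PySem.Chars.join_cons_cons]

-- A's append-accumulating loop equals B's '"".join' of the per-element strings
theorem pvFoldlJoin (l : List Int) (f : Int → String) (s : String) :
    l.foldl (fun p i => p ++ f i) s = s ++ PySem.Str.join "" (l.map f) := by
  induction l generalizing s with
  | nil => simp [pvJoinNil]
  | cons x xs ih => simp [ih, pvJoinCons, String.append_assoc]

-- range(1) is [0]
theorem pvRange01 : PySem.List.pyRange 0 1 1 = [0] := by decide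

-- A's four sequential 'if i % 4 == k' blocks emit exactly B's cmds[i % 4] line
theorem pvMixStep (p : String) (i : Int) :
    (let p1 := if PySem.Int.mod i 4 == 0 then
        ((p ++ ("process" ++ PySem.Int.toStr i ++ " = { "))
          ++ "command = \"./bwaves_base.i386-m32-gcc42-nn\";") ++ " };\n" else p;
     let p2 := if PySem.Int.mod i 4 == 1 then
        ((p1 ++ ("process" ++ PySem.Int.toStr i ++ " = { "))
          ++ "command = \"./GemsFDTD_base.i386-m32-gcc42-nn\";") ++ " };\n" else p1;
     let p3 := if PySem.Int.mod i 4 == 2 then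
        ((p2 ++ ("process" ++ PySem.Int.toStr i ++ " = { "))
          ++ "command = \"./mcf_base.i386-m32-gcc42-nn inp.in\";") ++ " };\n" else p2;
     if PySem.Int.mod i 4 == 3 then
        ((p3 ++ ("process" ++ PySem.Int.toStr i ++ " = { "))
          ++ "command = \"./milc_base.i386-m32-gcc42-nn\"; input = \"su3imp.in\";") ++ " };\n" else p3)
    = p ++ ("process" ++ PySem.Int.toStr i ++ " = { "
        ++ (PySem.List.pyGet? [pvBW, pvGE, pvMC, pvMI]
              (PySem.Int.mod i ((4 : Int)))).getD ""
        ++ " };\n") := by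
  have h0 := PySem.Int.mod_nonneg i (b := (4 : Int)) (by norm_num)
  have h4 := PySem.Int.mod_lt i (b := (4 : Int)) (by norm_num)
  have : PySem.Int.mod i 4 = 0 ∨ PySem.Int.mod i 4 = 1 ∨ PySem.Int.mod i 4 = 2 ∨ PySem.Int.mod i 4 = 3 := by omega
  rcases this with h | h | h | h <;> rw [h] <;>
    simp only [PySem.List.pyGet?, PySem.List.pyIdx?] <;>
    norm_num [String.append_assoc, pvBW, pvGE, pvMC, pvMI] <;> rfl


-- ===== VERDICT (by name: the statement is the Claim_ definition above) =====
theorem what_is_processes_for_spec : Claim_equal_what_is_processes_for := by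
  intro b _
  unfold Spec_what_is_processes_for what_is_processes_for what_is_processes_for_alt
  by_cases h1 : b = "1_bwaves"
  · subst h1
    rw [show PySem.Dict.get? pvTable "1_bwaves" = some ((16:Int), [pvBW]) from by decide]
    simp only [pvMixStep]
    simp [pvFoldlJoin, pvBW, String.append_assoc]
  · by_cases h2 : b = "2_gems"
    · subst h2
      rw [show PySem.Dict.get? pvTable "2_gems" = some ((16:Int), [pvGE]) from by decide]
      simp [pvFoldlJoin, pvGE, String.append_assoc]
    · by_cases h3 : b = "4_mcf"
      · subst h3
        rw [show PySem.Dict.get? pvTable "4_mcf" = some ((16:Int), [pvMC]) from by decide]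
        simp [pvFoldlJoin, pvMC, String.append_assoc]
      · by_cases h4 : b = "5_milc"
        · subst h4
          rw [show PySem.Dict.get? pvTable "5_milc" = some ((16:Int), [pvMI]) from by decide]
          simp [pvFoldlJoin, pvMI, String.append_assoc]
        · by_cases h5 : b = "7_mix"
          · subst h5
            rw [show PySem.Dict.get? pvTable "7_mix" = some ((16:Int), [pvBW, pvGE, pvMC, pvMI]) from by decide]
            simp only [pvMixStep]
            simp [pvFoldlJoin, pvBW, pvGE, pvMC, pvMI, String.append_assoc]
          · by_cases h6 : b = "1_bfs"
            · subst h6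
              rw [show PySem.Dict.get? pvTable "1_bfs" = some ((1:Int), [pvGap "bfs" ".sg -n64"]) from by decide]
              simp [pvRange01, pvJoinCons, pvJoinNil, pvGap, pvGAPBS, pvGraph, String.append_assoc]
            · by_cases h7 : b = "2_pr"
              · subst h7
                rw [show PySem.Dict.get? pvTable "2_pr" = some ((1:Int), [pvGap "pr" ".sg -i1000 -t1e-4 -n16"]) from by decide]
                simp [pvRange01, pvJoinCons, pvJoinNil, pvGap, pvGAPBS, pvGraph, String.append_assoc]
              · by_cases h8 : b = "3_cc"
                · subst h8
                  rw [show PySem.Dict.get? pvTable "3_cc" = some ((1:Int), [pvGap "cc" ".sg -n16"]) from by decide]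
                  simp [pvRange01, pvJoinCons, pvJoinNil, pvGap, pvGAPBS, pvGraph, String.append_assoc]
                · by_cases h9 : b = "4_bc"
                  · subst h9
                    rw [show PySem.Dict.get? pvTable "4_bc" = some ((1:Int), [pvGap "bc" ".sg -i4 -n16"]) from by decide]
                    simp [pvRange01, pvJoinCons, pvJoinNil, pvGap, pvGAPBS, pvGraph, String.append_assoc]
                  · by_cases h10 : b = "5_sssp"
                    · subst h10
                      rw [show PySem.Dict.get? pvTable "5_sssp" = some ((1:Int), [pvGap "sssp" ".wsg -n64 -d2"]) from by decide]
                      simp [pvRange01, pvJoinCons, pvJoinNil, pvGap, pvGAPBS, pvGraph, String.append_assoc]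
                    · by_cases h11 : b = "6_tc"
                      · subst h11
                        rw [show PySem.Dict.get? pvTable "6_tc" = some ((1:Int), [pvGap "tc" "U.sg -n3"]) from by decide]
                        simp [pvRange01, pvJoinCons, pvJoinNil, pvGap, pvGAPBS, pvGraph, String.append_assoc]
                      · rw [show PySem.Dict.get? pvTable b = none from by
                            rw [show pvTable = PySem.Dict.mk
                              [ ("1_bwaves", ((16 : Int), [pvBW])), ("2_gems", (16, [pvGE])),
                                ("4_mcf", (16, [pvMC])), ("5_milc", (16, [pvMI])),
                                ("7_mix", (16, [pvBW, pvGE, pvMC, pvMI])),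
                                ("1_bfs", (1, [pvGap "bfs" ".sg -n64"])),
                                ("2_pr", (1, [pvGap "pr" ".sg -i1000 -t1e-4 -n16"])),
                                ("3_cc", (1, [pvGap "cc" ".sg -n16"])),
                                ("4_bc", (1, [pvGap "bc" ".sg -i4 -n16"])),
                                ("5_sssp", (1, [pvGap "sssp" ".wsg -n64 -d2"])),
                                ("6_tc", (1, [pvGap "tc" "U.sg -n3"])) ] from by decide]
                            simp [PySem.Dict.get?,
                              Ne.symm h1, Ne.symm h2, Ne.symm h3, Ne.symm h4, Ne.symm h5, Ne.symm h6,
                              Ne.symm h7, Ne.symm h8, Ne.symm h9, Ne.symm h10, Ne.symm h11]]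
                        simp [h1, h2, h3, h4, h5, h6, h7, h8, h9, h10, h11]
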